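-- pv_equiv track=rewrite | github.com/chcomin/pyvane | pyvane/window_extraction.py | follow_edge
-- ===== SOURCE A (Python) =====
-- def in_region(pos, win_center, win_size):
--     '''Returns True if the given position is inside the window.
--
--     Parameters
--     ----------
--     pos : posição do ponto.
--     win_center : centro da janela.
--     win_size : tamanho da janela.
--
--     '''
--
--     half_win_size = win_size // 2
--     if pos[0] >= win_center[0] - half_win_size and pos[0] <= win_center[0] + half_win_size:
--         if pos[1] >= win_center[1] - half_win_size and pos[1] <= win_center[1] + half_win_size:
--             return True
--     return False
--
-- def follow_edge(pos_edge_aug, win_center, win_size):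
--     '''For a given edge, identifies the positions where the edge crosses the window. The edge is broken
--     at those positions and new edges are created for each part of the edge inside the window.
--
--     Parameters
--     ----------
--     pos_edge_aug : List
--         List of pixels
--     win_center : tuple of int
--         The center of the window
--     win_size : int
--         The size of the window
--
--     Returns
--     -------
--     new_edges_pos : List
--         Each item of this list contains the pixels of a new edge inside the window. These edges are
--         portions of the original edge (`pos_edge_aug`) that are inside the window. Note that the first
--         and last elements of a given edge are actually the position of the nodes that should connect
--         to the edge.
--     '''
--
--     curr_inside = in_region(pos_edge_aug[0], win_center, win_size)
--     new_edges_pos = []  # Stores the new edges generated from a single edge crossing the window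
--     new_edge_pos = []   # Stores the position of a new edge
--     for idx in range(len(pos_edge_aug)-1):
--         pos = pos_edge_aug[idx]
--         next_inside = in_region(pos_edge_aug[idx+1], win_center, win_size)
--         if curr_inside==True:
--             # If we are inside the window, add current position to the new edge
--             new_edge_pos.append(pos)
--             if next_inside==False:
--                 # If the next position is outside the edge, store the current edge
--                 # and start a new one.
--                 new_edges_pos.append(new_edge_pos)
--                 new_edge_pos = []
--
--         # Set `curr_inside` for the next iteration of the loop
--         curr_inside = next_inside
--
--     if curr_inside==True:
--         # Add the last point if it is inside the window
--         idx += 1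
--         pos = pos_edge_aug[idx]
--         new_edge_pos.append(pos)
--         new_edges_pos.append(new_edge_pos)
--
--     return new_edges_pos
-- ===== SOURCE B (Python) =====
-- def follow_edge(pos_edge_aug, win_center, win_size):
--     """Two-phase version: first compute a boolean membership mask for all pixels,
--     then extract the maximal consecutive runs of in-window pixels as the new edges."""
--     half = win_size // 2
--     r0, r1 = win_center[0] - half, win_center[0] + half
--     c0, c1 = win_center[1] - half, win_center[1] + half
--     flags = [r0 <= p[0] <= r1 and c0 <= p[1] <= c1 for p in pos_edge_aug]
--     segments = []
--     i, n = 0, len(pos_edge_aug)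
--     while i < n:
--         if flags[i]:
--             j = i
--             while j < n and flags[j]:
--                 j += 1
--             segments.append(pos_edge_aug[i:j])
--             i = j
--         else:
--             i += 1
--     return segments
-- ===== Notes on version B (the rewrite author's own statement) =====
-- stated objective: alternative
-- what changed: Replaces A's curr/next lookahead state machine (with an edge accumulator and a post-loop fix-up for the last pixel) by a two-phase pass: compute a boolean membership mask for all pixels, then slice out the maximal consecutive runs of in-window pixels.
-- outside the precondition, e.g. on follow_edge([], (0, 0), 3): A raises IndexError, B returns []; on follow_edge([(0, 0)], (0, 0), 3): A raises UnboundLocalError, B returns [[(0, 0)]]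
import Mathlib
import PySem

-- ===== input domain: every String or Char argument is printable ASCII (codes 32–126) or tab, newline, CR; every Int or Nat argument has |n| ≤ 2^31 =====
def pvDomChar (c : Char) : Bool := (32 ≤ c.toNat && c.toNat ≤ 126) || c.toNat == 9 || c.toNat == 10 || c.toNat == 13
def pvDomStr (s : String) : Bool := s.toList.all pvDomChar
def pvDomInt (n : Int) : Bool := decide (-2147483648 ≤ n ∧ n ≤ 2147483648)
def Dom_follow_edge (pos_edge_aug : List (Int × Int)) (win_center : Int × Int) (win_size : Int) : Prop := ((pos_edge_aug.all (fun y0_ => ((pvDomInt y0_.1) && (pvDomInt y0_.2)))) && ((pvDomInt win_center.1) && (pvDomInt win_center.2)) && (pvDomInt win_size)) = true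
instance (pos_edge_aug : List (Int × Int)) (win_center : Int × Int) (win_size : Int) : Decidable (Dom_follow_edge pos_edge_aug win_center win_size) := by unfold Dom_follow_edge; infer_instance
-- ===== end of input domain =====

-- B replaces A's curr/next lookahead state machine by a two-phase mask-then-group pass; equal output on all inputs where the Python A returns (Pre_ excludes its two crash corners).


-- ===== PORT A =====
def in_region (pos : Int × Int) (win_center : Int × Int) (win_size : Int) : Bool :=
  let half_win_size := PySem.Int.floordiv win_size 2
  if win_center.1 - half_win_size ≤ pos.1 ∧ pos.1 ≤ win_center.1 + half_win_size then
    if win_center.2 - half_win_size ≤ pos.2 ∧ pos.2 ≤ win_center.2 + half_win_size then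
      true
    else false
  else false

-- A's for-loop with lookahead, as structural recursion over the same state
-- (curr_inside, new_edges_pos, new_edge_pos, current pos, remaining pixels);
-- the base case is Python's post-loop `if curr_inside` block (pos is then the last pixel).
def followLoop (win_center : Int × Int) (win_size : Int) :
    Bool → List (List (Int × Int)) → List (Int × Int) → (Int × Int) → List (Int × Int) →
    List (List (Int × Int))
  | curr_inside, new_edges_pos, new_edge_pos, pos, [] =>
    if curr_inside then new_edges_pos ++ [new_edge_pos ++ [pos]] else new_edges_pos
  | curr_inside, new_edges_pos, new_edge_pos, pos, nxt :: rest =>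
    let next_inside := in_region nxt win_center win_size
    if curr_inside then
      let new_edge_pos' := new_edge_pos ++ [pos]
      if next_inside = false then
        followLoop win_center win_size next_inside (new_edges_pos ++ [new_edge_pos']) [] nxt rest
      else
        followLoop win_center win_size next_inside new_edges_pos new_edge_pos' nxt rest
    else
      followLoop win_center win_size next_inside new_edges_pos new_edge_pos nxt rest

def follow_edge (pos_edge_aug : List (Int × Int)) (win_center : Int × Int) (win_size : Int) : List (List (Int × Int)) :=
  match pos_edge_aug with
  | [] => []  -- Python raises IndexError here (pos_edge_aug[0]); excluded by Pre_
  | p :: rest =>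
    followLoop win_center win_size (in_region p win_center win_size) [] [] p rest

-- ===== PORT B =====
-- B's run extraction: outer while-loop skipping False flags, inner while-loop
-- (takeWhile/dropWhile) delimiting a maximal run of True flags.
-- fuel = length of the list, so the fuel-0 case is never reached (outer while loop)
def collectRunsF : Nat → List (Bool × (Int × Int)) → List (List (Int × Int))
  | _, [] => []
  | 0, _ :: _ => []
  | fuel + 1, (false, _) :: rest => collectRunsF fuel rest
  | fuel + 1, (true, p) :: rest =>
    (p :: (rest.takeWhile (·.1)).map (·.2)) :: collectRunsF fuel (rest.dropWhile (·.1))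

def collectRuns (l : List (Bool × (Int × Int))) : List (List (Int × Int)) :=
  collectRunsF l.length l

def follow_edge_alt (pos_edge_aug : List (Int × Int)) (win_center : Int × Int) (win_size : Int) : List (List (Int × Int)) :=
  let half := PySem.Int.floordiv win_size 2
  let flags := pos_edge_aug.map (fun p =>
    decide (win_center.1 - half ≤ p.1 ∧ p.1 ≤ win_center.1 + half ∧
            win_center.2 - half ≤ p.2 ∧ p.2 ≤ win_center.2 + half))
  collectRuns (flags.zip pos_edge_aug)

-- ===== PRECONDITION & SPEC =====
-- closed-form "first pixel is inside the window" (used only by Pre_/Raises_)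
def insideWin (p : Int × Int) (win_center : Int × Int) (win_size : Int) : Prop :=
  win_center.1 - PySem.Int.floordiv win_size 2 ≤ p.1 ∧ p.1 ≤ win_center.1 + PySem.Int.floordiv win_size 2 ∧
  win_center.2 - PySem.Int.floordiv win_size 2 ≤ p.2 ∧ p.2 ≤ win_center.2 + PySem.Int.floordiv win_size 2

-- Pre_ excludes exactly the inputs where Python A raises: the empty list (IndexError on
-- pos_edge_aug[0]) and a one-pixel list whose pixel is inside the window (UnboundLocalError on idx).
def Pre_follow_edge (pos_edge_aug : List (Int × Int)) (win_center : Int × Int) (win_size : Int) : Prop :=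
  pos_edge_aug ≠ [] ∧ (2 ≤ pos_edge_aug.length ∨ ¬ insideWin pos_edge_aug.headI win_center win_size)

instance (pos_edge_aug : List (Int × Int)) (win_center : Int × Int) (win_size : Int) : Decidable (Pre_follow_edge pos_edge_aug win_center win_size) := by
  unfold Pre_follow_edge insideWin; infer_instance

def pvWitness_follow_edge : (List (Int × Int)) × (Int × Int) × Int := ([(0, 0), (5, 5), (1, 1)], (0, 0), 3)

def Spec_follow_edge (pos_edge_aug : List (Int × Int)) (win_center : Int × Int) (win_size : Int) (out : List (List (Int × Int))) : Prop := out = follow_edge_alt pos_edge_aug win_center win_size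
instance (pos_edge_aug : List (Int × Int)) (win_center : Int × Int) (win_size : Int) (out : List (List (Int × Int))) : Decidable (Spec_follow_edge pos_edge_aug win_center win_size out) := by unfold Spec_follow_edge; infer_instance

-- ===== CLAIM (what is proved, stated in full; the proofs are below) =====
def Claim_equal_follow_edge : Prop := ∀ (pos_edge_aug : List (Int × Int)) (win_center : Int × Int) (win_size : Int), Dom_follow_edge pos_edge_aug win_center win_size → Pre_follow_edge pos_edge_aug win_center win_size → Spec_follow_edge pos_edge_aug win_center win_size (follow_edge pos_edge_aug win_center win_size)

-- ===== LEMMAS AND PROOFS =====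

-- canonical "maximal runs of f-true elements" both ports are reduced to
def pvRuns (f : (Int × Int) → Bool) : List (Int × Int) → List (List (Int × Int))
  | [] => []
  | a :: l => if f a then (a :: l.takeWhile f) :: pvRuns f (l.dropWhile f) else pvRuns f l
termination_by l => l.length
decreasing_by
  · have := List.length_dropWhile_le f l
    simp only [List.length_cons]; omega
  · simp

lemma followLoop_spec (wc : Int × Int) (ws : Int) :
    ∀ (rest : List (Int × Int)) (pos : Int × Int) (edges : List (List (Int × Int))) (edge : List (Int × Int)),
      (in_region pos wc ws = true →
        followLoop wc ws true edges edge pos rest =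
          edges ++ ((edge ++ pos :: rest.takeWhile (in_region · wc ws)) ::
            pvRuns (in_region · wc ws) (rest.dropWhile (in_region · wc ws)))) ∧
      (in_region pos wc ws = false →
        followLoop wc ws false edges [] pos rest = edges ++ pvRuns (in_region · wc ws) rest) := by
  intro rest
  induction rest with
  | nil =>
    intro pos edges edge
    constructor <;> intro _ <;> simp [followLoop, pvRuns]
  | cons nxt rest ih =>
    intro pos edges edge
    constructor <;> intro _
    · by_cases hn : in_region nxt wc ws = true
      · have := (ih nxt edges (edge ++ [pos])).1 hn
        simp [followLoop, hn, this]
      · simp only [Bool.not_eq_true] at hn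
        have := (ih nxt (edges ++ [edge ++ [pos]]) edge).2 hn
        simp [followLoop, hn, this, pvRuns]
    · by_cases hn : in_region nxt wc ws = true
      · have := (ih nxt edges []).1 hn
        simp [followLoop, hn, this, pvRuns]
      · simp only [Bool.not_eq_true] at hn
        have := (ih nxt edges edge).2 hn
        simp [followLoop, hn, this, pvRuns]

lemma follow_edge_eq_runs (pe : List (Int × Int)) (wc : Int × Int) (ws : Int) (h : pe ≠ []) :
    follow_edge pe wc ws = pvRuns (in_region · wc ws) pe := by
  cases pe with
  | nil => exact absurd rfl h
  | cons p rest =>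
    by_cases hp : in_region p wc ws = true
    · have := (followLoop_spec wc ws rest p [] []).1 hp
      simp [follow_edge, hp, this, pvRuns]
    · simp only [Bool.not_eq_true] at hp
      have := (followLoop_spec wc ws rest p [] []).2 hp
      simp [follow_edge, hp, this, pvRuns]

lemma in_region_eq_decide (p : Int × Int) (wc : Int × Int) (ws : Int) :
    in_region p wc ws =
      decide (wc.1 - PySem.Int.floordiv ws 2 ≤ p.1 ∧ p.1 ≤ wc.1 + PySem.Int.floordiv ws 2 ∧
              wc.2 - PySem.Int.floordiv ws 2 ≤ p.2 ∧ p.2 ≤ wc.2 + PySem.Int.floordiv ws 2) := by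
  simp only [in_region]
  split_ifs with h1 h2 <;> simp_all

lemma collectRunsF_map (f : (Int × Int) → Bool) :
    ∀ (fuel : Nat) (l : List (Int × Int)), l.length ≤ fuel →
      collectRunsF fuel (l.map (fun a => (f a, a))) = pvRuns f l := by
  intro fuel
  induction fuel with
  | zero =>
    intro l hl
    have : l = [] := List.eq_nil_of_length_eq_zero (Nat.le_zero.mp hl)
    subst this; simp [collectRunsF, pvRuns]
  | succ fuel ih =>
    intro l hl
    cases l with
    | nil => simp [collectRunsF, pvRuns]
    | cons a l =>
      have ht : (l.map (fun a => (f a, a))).takeWhile (·.1) = (l.takeWhile f).map (fun a => (f a, a)) := by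
        rw [List.takeWhile_map]; rfl
      have hd : (l.map (fun a => (f a, a))).dropWhile (·.1) = (l.dropWhile f).map (fun a => (f a, a)) := by
        rw [List.dropWhile_map]; rfl
      simp only [List.length_cons, Nat.add_le_add_iff_right] at hl
      by_cases ha : f a = true
      · have hdl : (l.dropWhile f).length ≤ fuel :=
          le_trans (List.length_dropWhile_le f l) hl
        simp only [List.map_cons, collectRunsF, ha, ht, hd, ih _ hdl, pvRuns, if_pos,
          List.map_map, Function.comp_def, List.map_id']
      · rw [Bool.not_eq_true] at ha
        simp [collectRunsF, ha, ih _ hl, pvRuns]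

lemma collectRuns_map (f : (Int × Int) → Bool) (l : List (Int × Int)) :
    collectRuns (l.map (fun a => (f a, a))) = pvRuns f l := by
  unfold collectRuns
  rw [List.length_map]
  exact collectRunsF_map f l.length l le_rfl

lemma follow_edge_alt_eq_runs (pe : List (Int × Int)) (wc : Int × Int) (ws : Int) :
    follow_edge_alt pe wc ws = pvRuns (in_region · wc ws) pe := by
  have hzip : ∀ (g : (Int × Int) → Bool) (l : List (Int × Int)),
      (l.map g).zip l = l.map (fun a => (g a, a)) := by
    intro g l; induction l with
    | nil => rfl
    | cons a l ih => simp only [List.map_cons, List.zip_cons_cons, ih]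
  simp only [follow_edge_alt, hzip]
  have : (fun p : Int × Int =>
      decide (wc.1 - PySem.Int.floordiv ws 2 ≤ p.1 ∧ p.1 ≤ wc.1 + PySem.Int.floordiv ws 2 ∧
              wc.2 - PySem.Int.floordiv ws 2 ≤ p.2 ∧ p.2 ≤ wc.2 + PySem.Int.floordiv ws 2)) =
      (in_region · wc ws) := by
    funext p; rw [in_region_eq_decide]
  rw [show (fun a : Int × Int => (decide (wc.1 - PySem.Int.floordiv ws 2 ≤ a.1 ∧ a.1 ≤ wc.1 + PySem.Int.floordiv ws 2 ∧ wc.2 - PySem.Int.floordiv ws 2 ≤ a.2 ∧ a.2 ≤ wc.2 + PySem.Int.floordiv ws 2), a)) = (fun a : Int × Int => (in_region a wc ws, a)) from by funext a; rw [in_region_eq_decide]]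
  exact collectRuns_map _ _

-- ===== VERDICT (by name: the statement is the Claim_ definition above) =====
theorem follow_edge_spec : Claim_equal_follow_edge := by
  intro pe wc ws _ hpre
  unfold Spec_follow_edge
  rw [follow_edge_eq_runs pe wc ws hpre.1, follow_edge_alt_eq_runs]
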